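-- pv_equiv track=rewrite | github.com/aubrey2019/Firebase-and-JSON- | search.py | list_desc
-- ===== SOURCE A (Python) =====
-- def list_desc(LIST):
--
--     a = {}
--     for i in LIST:
--         if i in a:
--             a[i] = a[i] + 1
--         else:
--             a[i] = 1
--
--     b = sorted(a.items(),key=lambda item:item[1],reverse=True)
--     c=[]
--     for item in b:
--         c.append(item[0])
--     return c
-- ===== SOURCE B (Python) =====
-- def list_desc(LIST):
--     counts = {}
--     for i in LIST:
--         counts[i] = counts.get(i, 0) + 1
--     buckets = {}
--     for k, c in counts.items():
--         buckets.setdefault(c, []).append(k)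
--     out = []
--     for c in range(max(counts.values(), default=0), 0, -1):
--         out.extend(buckets.get(c, []))
--     return out
-- ===== Notes on version B (the rewrite author's own statement) =====
-- stated objective: alternative
-- what changed: Replaces the comparison sort of (element,count) items by a counting/bucket pass: items are grouped into per-count buckets in insertion order and the buckets are emitted from the maximum count down to 1.
import Mathlib
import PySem

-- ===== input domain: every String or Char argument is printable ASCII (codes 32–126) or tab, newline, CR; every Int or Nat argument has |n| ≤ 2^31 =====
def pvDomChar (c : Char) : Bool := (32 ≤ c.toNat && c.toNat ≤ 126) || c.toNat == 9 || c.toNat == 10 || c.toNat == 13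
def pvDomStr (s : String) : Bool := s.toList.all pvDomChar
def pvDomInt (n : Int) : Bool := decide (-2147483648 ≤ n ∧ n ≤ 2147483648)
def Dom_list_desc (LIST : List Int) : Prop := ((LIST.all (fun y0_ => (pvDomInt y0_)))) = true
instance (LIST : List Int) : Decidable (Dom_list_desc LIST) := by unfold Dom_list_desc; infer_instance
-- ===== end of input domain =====

-- B replaces A's comparison sort of the (element, count) items by a counting/bucket pass:
-- per-count buckets filled in insertion order, emitted from the maximum count down to 1.

-- ===== PORT A =====
def list_desc (LIST : List Int) : List Int :=
  let a := LIST.foldl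
    (fun d i => if d.contains i then d.insert i (d.getD i 0 + 1) else d.insert i 1)
    (PySem.Dict.empty : PySem.Dict Int Int)
  let b := PySem.List.sorted a.items (fun item => item.2) true
  b.foldl (fun c item => c ++ [item.1]) []

-- ===== PORT B =====
def list_desc_alt (LIST : List Int) : List Int :=
  let counts := LIST.foldl (fun d i => d.insert i (d.getD i 0 + 1))
    (PySem.Dict.empty : PySem.Dict Int Int)
  let buckets := counts.items.foldl
    (fun (b : PySem.Dict Int (List Int)) p => b.modify p.2 [] (· ++ [p.1]))
    PySem.Dict.empty
  (PySem.List.pyRange (PySem.List.maxD counts.values (fun v => v) 0) 0 (-1)).foldl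
    (fun out c => out ++ buckets.getD c []) []

-- ===== PRECONDITION & SPEC =====
def Spec_list_desc (LIST : List Int) (out : List Int) : Prop := out = list_desc_alt LIST
instance (LIST : List Int) (out : List Int) : Decidable (Spec_list_desc LIST out) := by unfold Spec_list_desc; infer_instance

-- ===== CLAIM (what is proved, stated in full; the proofs are below) =====
def Claim_equal_list_desc : Prop := ∀ (LIST : List Int), Dom_list_desc LIST → Spec_list_desc LIST (list_desc LIST)

-- ===== LEMMAS AND PROOFS =====

-- A's counting loop (membership test, then increment or initialise) is exactly Counter(LIST).
lemma countA_eq_counter (LIST : List Int) :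
    LIST.foldl
      (fun (d : PySem.Dict Int Int) i =>
        if d.contains i = true then d.insert i (d.getD i 0 + 1) else d.insert i 1)
      PySem.Dict.empty = PySem.Dict.counter LIST := by
  have h := PySem.List.foldl_congr_mem (l := LIST)
      (f := fun (d : PySem.Dict Int Int) i =>
        if d.contains i = true then d.insert i (d.getD i 0 + 1) else d.insert i 1)
      (g := fun (d : PySem.Dict Int Int) i => d.insert i (d.getD i 0 + 1))
      (init := PySem.Dict.empty)
      (by intro d i _
          by_cases hc : d.contains i
          · simp [hc]
          · simp [hc, PySem.Dict.getD_of_not_contains d 0 (by simpa using hc)])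
  exact h.trans (PySem.Dict.foldl_insert_getD_add_one_eq_counter LIST)

-- The one-step equation of PySem.List.insertBy (definitional).
lemma insertBy_cons_eq {α : Type} (before : α → α → Bool) (x y : α) (ys : List α) :
    PySem.List.insertBy before x (y :: ys)
      = if before x y then x :: y :: ys else y :: PySem.List.insertBy before x ys := rfl

-- insertBy skips a prefix on which `before` is false.
lemma insertBy_append_of_not_before {α : Type} (before : α → α → Bool) (x : α)
    (B R : List α) (h : ∀ y ∈ B, before x y = false) :
    PySem.List.insertBy before x (B ++ R) = B ++ PySem.List.insertBy before x R := by
  induction B with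
  | nil => simp
  | cons y ys ih =>
    rw [List.cons_append, insertBy_cons_eq, h y (by simp),
        ih (fun w hw => h w (by simp [hw]))]
    simp

-- insertBy puts x in front when `before` holds everywhere (in particular at the head).
lemma insertBy_cons_of_all_before {α : Type} (before : α → α → Bool) (x : α)
    (R : List α) (h : ∀ y ∈ R, before x y = true) :
    PySem.List.insertBy before x R = x :: R := by
  cases R with
  | nil => rfl
  | cons y ys => rw [insertBy_cons_eq, h y (by simp)]; simp

-- One insertion step preserves the bucketed-by-descending-key shape: x lands at the end
-- of its own key's bucket.
lemma insertBy_flatMap {α : Type} (key : α → Int) (x : α) (xs : List α) (cs : List Int)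
    (hdesc : cs.Pairwise (fun a b => b < a)) (hx : key x ∈ cs) :
    PySem.List.insertBy (fun a b => decide (key b < key a)) x
        (cs.flatMap (fun c => xs.filter (fun y => key y == c)))
      = cs.flatMap (fun c => (xs ++ [x]).filter (fun y => key y == c)) := by
  induction cs with
  | nil => simp at hx
  | cons c cs' ih =>
    have hlt : ∀ b ∈ cs', b < c := (List.pairwise_cons.mp hdesc).1
    have hdesc' := (List.pairwise_cons.mp hdesc).2
    simp only [List.flatMap_cons]
    by_cases hxc : key x = c
    · -- x joins the first bucket, at its end
      rw [insertBy_append_of_not_before _ _ _ _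
          (by intro y hy
              simp only [List.mem_filter, beq_iff_eq] at hy
              simp [hy.2, hxc])]
      rw [insertBy_cons_of_all_before _ _ _
          (by intro y hy
              simp only [List.mem_flatMap, List.mem_filter, beq_iff_eq] at hy
              obtain ⟨c', hc', -, hkey⟩ := hy
              simp [hkey, hxc, hlt c' hc'])]
      have hrest : cs'.flatMap (fun c => (xs ++ [x]).filter (fun y => key y == c))
          = cs'.flatMap (fun c => xs.filter (fun y => key y == c)) := by
        apply List.flatMap_congr
        intro c' hc'
        rw [List.filter_append]
        have : key x ≠ c' := by have := hlt c' hc'; omega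
        simp [this]
      rw [hrest]
      simp [List.filter_append, hxc]
    · -- x's bucket is further down
      have hx' : key x ∈ cs' := by simpa [hxc] using hx
      have hxlt : key x < c := hlt _ hx'
      rw [insertBy_append_of_not_before _ _ _ _
          (by intro y hy
              simp only [List.mem_filter, beq_iff_eq] at hy
              simp [hy.2]
              omega)]
      rw [ih hdesc' hx']
      have : (xs ++ [x]).filter (fun y => key y == c) = xs.filter (fun y => key y == c) := by
        rw [List.filter_append]; simp [hxc]
      rw [this]

-- Stability of Python's reverse sort, named: sorting by an Int key with reverse=True
-- is the concatenation, over any strictly decreasing list cs covering all keys,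
-- of the key-c elements in original order.
lemma sorted_rev_eq_flatMap_filter {α : Type} (key : α → Int) (xs : List α) (cs : List Int)
    (hdesc : cs.Pairwise (fun a b => b < a)) (hmem : ∀ x ∈ xs, key x ∈ cs) :
    PySem.List.sorted xs key true
      = cs.flatMap (fun c => xs.filter (fun x => key x == c)) := by
  rw [PySem.List.sorted_rev_eq_foldl_insertBy]
  induction xs using List.reverseRecOn with
  | nil => simp
  | append_singleton ys y ih =>
    rw [List.foldl_append, List.foldl_cons, List.foldl_nil,
        ih (fun x hx => hmem x (by simp [hx])),
        insertBy_flatMap key y ys cs hdesc (hmem y (by simp))]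

-- range(m, 0, -1) in closed form.
lemma pyRange_desc (m : Int) :
    PySem.List.pyRange m 0 (-1) = (List.range m.toNat).map (fun (k : Nat) => m - (k : Int)) := by
  by_cases hm : 0 < m
  · simp only [PySem.List.pyRange]
    norm_num [hm]
    intro k _
    ring
  · simp [PySem.List.pyRange, hm, Int.toNat_eq_zero.mpr (by omega : m ≤ 0)]

lemma mem_pyRange_desc {m c : Int} : c ∈ PySem.List.pyRange m 0 (-1) ↔ 0 < c ∧ c ≤ m := by
  rw [pyRange_desc]
  simp only [List.mem_map, List.mem_range]
  constructor
  · rintro ⟨k, hk, rfl⟩; omega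
  · intro ⟨h1, h2⟩
    exact ⟨(m - c).toNat, by omega, by omega⟩

lemma pyRange_desc_pairwise (m : Int) :
    (PySem.List.pyRange m 0 (-1)).Pairwise (fun a b => b < a) := by
  rw [pyRange_desc]
  refine List.pairwise_map.mpr (List.pairwise_lt_range.imp ?_)
  intro a b h
  omega

-- B's bucket dict, looked up at c, is the keys whose count is c, in insertion order.
lemma buckets_getD (items : List (Int × Int)) (c : Int) :
    (items.foldl (fun (b : PySem.Dict Int (List Int)) p => b.modify p.2 [] (· ++ [p.1]))
        PySem.Dict.empty).getD c []
      = (items.filter (fun p => p.2 == c)).map (·.1) := by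
  have h : items.foldl (fun (b : PySem.Dict Int (List Int)) p => b.modify p.2 [] (· ++ [p.1]))
        PySem.Dict.empty
      = (items.map Prod.swap).foldl
          (fun (b : PySem.Dict Int (List Int)) q => b.modify q.1 [] (· ++ [q.2]))
          PySem.Dict.empty := by
    rw [List.foldl_map]; rfl
  rw [h, PySem.Dict.getD_foldl_modify_append]
  simp [List.filter_map, List.map_map, Function.comp_def, Prod.swap]

-- Every count stored in Counter(LIST) lies in range(max(values, default=0), 0, -1).
lemma counts_mem_range (LIST : List Int) (p : Int × Int)
    (hp : p ∈ (PySem.Dict.counter LIST).items) :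
    p.2 ∈ PySem.List.pyRange
      (PySem.List.maxD (PySem.Dict.counter LIST).values (fun v => v) 0) 0 (-1) := by
  rw [mem_pyRange_desc]
  have hval : p.2 ∈ (PySem.Dict.counter LIST).values := by
    simp only [PySem.Dict.values]
    exact List.mem_map.mpr ⟨p, hp, rfl⟩
  constructor
  · -- counts are positive
    rw [PySem.Dict.items_counter] at hp
    obtain ⟨k, hk, rfl⟩ := List.mem_map.mp hp
    have : k ∈ LIST := (PySem.Set.mem_ofList LIST k).mp hk
    simp only []
    exact_mod_cast List.count_pos_iff.mpr this
  · -- counts are at most the maximum of the values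
    unfold PySem.List.maxD
    rcases hmax : PySem.List.max? (PySem.Dict.counter LIST).values (fun v => v) with _ | mv
    · rw [PySem.List.max?_eq_none_iff] at hmax
      rw [hmax] at hval
      simp at hval
    · simpa using PySem.List.max?_isMax hmax p.2 hval

-- ===== VERDICT (by name: the statement is the Claim_ definition above) =====
theorem list_desc_spec : Claim_equal_list_desc := by
  intro LIST _
  unfold Spec_list_desc list_desc list_desc_alt
  dsimp only
  rw [countA_eq_counter, PySem.Dict.foldl_insert_getD_add_one_eq_counter]
  rw [PySem.List.foldl_append_singleton_eq_map, PySem.List.foldl_append_eq_flatMap,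
      List.nil_append, List.nil_append]
  rw [sorted_rev_eq_flatMap_filter (fun item => item.2) (PySem.Dict.counter LIST).items
      (PySem.List.pyRange (PySem.List.maxD (PySem.Dict.counter LIST).values (fun v => v) 0) 0 (-1))
      (pyRange_desc_pairwise _) (counts_mem_range LIST)]
  rw [List.map_flatMap]
  apply List.flatMap_congr
  intro c _
  rw [buckets_getD]
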